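-- pv_equiv track=rewrite | github.com/openmrs/openmrs-core | metrics/enhanced_service_analyzer.py | build_coupling_matrix
-- ===== SOURCE A (Python) =====
-- def build_coupling_matrix(service_metrics):
--     """Build a coupling matrix between services"""
--     service_names = list(service_metrics.keys())
--     n = len(service_names)
--
--     # Initialize matrix as list of lists
--     coupling_matrix = [[0 for _ in range(n)] for _ in range(n)]
--     name_to_idx = {name: i for i, name in enumerate(service_names)}
--
--     # Fill matrix with dependencies
--     for service_name, metrics in service_metrics.items():
--         if service_name in name_to_idx:
--             service_idx = name_to_idx[service_name]
--             for dep in metrics['service_dependencies']: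
--                 if dep in name_to_idx:
--                     dep_idx = name_to_idx[dep]
--                     coupling_matrix[service_idx][dep_idx] = 1
--
--     return coupling_matrix, service_names
-- ===== SOURCE B (Python) =====
-- def build_coupling_matrix(service_metrics):
--     """Build a coupling matrix between services"""
--     service_names = list(service_metrics.keys())
--     coupling_matrix = []
--     for metrics in service_metrics.values():
--         dep_set = set(metrics['service_dependencies'])
--         coupling_matrix.append([1 if other in dep_set else 0 for other in service_names])
--     return coupling_matrix, service_names
-- ===== Notes on version B (the rewrite author's own statement) =====
-- stated objective: idiomatic
-- what changed: B drops the preallocated zero matrix and the name->index dict entirely: for each service it turns the dependency list into a set and builds the full row with a membership-test comprehension over service_names, instead of A's scatter of indexed 1s into a mutable zero matrix.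
import Mathlib
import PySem

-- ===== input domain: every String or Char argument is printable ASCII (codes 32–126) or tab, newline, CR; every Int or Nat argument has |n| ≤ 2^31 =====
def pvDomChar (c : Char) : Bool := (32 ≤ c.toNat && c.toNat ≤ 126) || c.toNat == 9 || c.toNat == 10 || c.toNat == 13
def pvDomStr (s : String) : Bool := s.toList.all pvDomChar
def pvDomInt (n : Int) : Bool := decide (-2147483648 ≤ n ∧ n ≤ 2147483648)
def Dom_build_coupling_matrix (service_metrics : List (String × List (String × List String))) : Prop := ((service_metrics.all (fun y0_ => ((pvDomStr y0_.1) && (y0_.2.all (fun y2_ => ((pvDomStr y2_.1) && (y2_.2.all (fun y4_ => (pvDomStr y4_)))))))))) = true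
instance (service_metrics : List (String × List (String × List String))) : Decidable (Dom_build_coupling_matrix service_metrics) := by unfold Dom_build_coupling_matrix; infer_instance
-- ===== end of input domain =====

-- B builds each matrix row densely by membership-testing every service name against the row's dependency set,
-- instead of A's preallocate-zeros-then-scatter over a name→index dict (objective: idiomatic; same asymptotic cost).

-- ===== PORT A =====
-- name_to_idx = {name: i for i, name in enumerate(service_names)}
def pvBuildNameToIdx (names : List String) : PySem.Dict String Int :=
  (PySem.List.enumerate names 0).foldl (fun t p => t.insert p.2 p.1) PySem.Dict.empty

-- coupling_matrix[i][j] = 1 ; i, j come from enumerate positions so they are ≥ 0 and toNat is exact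
def pvSetEntry (m : List (List Int)) (i j : Int) : List (List Int) :=
  m.modify i.toNat (fun row => row.set j.toNat 1)

def build_coupling_matrix (service_metrics : List (String × List (String × List String))) : List (List Int) × List String :=
  let d := PySem.Dict.ofList service_metrics
  let service_names := d.keys
  let n : Int := (service_names.length : Int)
  let coupling0 : List (List Int) :=
    (PySem.List.pyRange 0 n 1).map (fun _ => (PySem.List.pyRange 0 n 1).map (fun _ => (0 : Int)))
  let name_to_idx := pvBuildNameToIdx service_names
  -- metrics['service_dependencies'] raises KeyError when the key is missing; Pre_ excludes that, so getD is exact there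
  let mat := d.items.foldl (fun mat p =>
    if name_to_idx.contains p.1 then
      let service_idx := name_to_idx.getD p.1 0
      ((PySem.Dict.ofList p.2).getD "service_dependencies" []).foldl
        (fun mat dep =>
          if name_to_idx.contains dep then
            pvSetEntry mat service_idx (name_to_idx.getD dep 0)
          else mat) mat
    else mat) coupling0
  (mat, service_names)

-- ===== PORT B =====
def build_coupling_matrix_alt (service_metrics : List (String × List (String × List String))) : List (List Int) × List String :=
  let d := PySem.Dict.ofList service_metrics
  let service_names := d.keys
  -- metrics['service_dependencies'] raises KeyError when the key is missing; Pre_ excludes that, so getD is exact there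
  let coupling_matrix := d.values.map (fun metrics =>
    let dep_set := PySem.Set.ofList ((PySem.Dict.ofList metrics).getD "service_dependencies" [])
    service_names.map (fun other => if dep_set.contains other then (1 : Int) else 0))
  (coupling_matrix, service_names)

-- ===== PRECONDITION & SPEC =====
-- Pre_ excludes exactly the inputs where some (surviving) metrics dict lacks 'service_dependencies': there Python A raises KeyError.
def Pre_build_coupling_matrix (service_metrics : List (String × List (String × List String))) : Prop :=
  ∀ metrics ∈ (PySem.Dict.ofList service_metrics).values,
    (PySem.Dict.ofList metrics).contains "service_dependencies" = true
instance (service_metrics : List (String × List (String × List String))) : Decidable (Pre_build_coupling_matrix service_metrics) := by unfold Pre_build_coupling_matrix; infer_instance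

def pvWitness_build_coupling_matrix : (List (String × List (String × List String))) :=
  [("a", [("service_dependencies", ["b"])]), ("b", [("service_dependencies", [])])]

def Spec_build_coupling_matrix (service_metrics : List (String × List (String × List String))) (out : List (List Int) × List String) : Prop := out = build_coupling_matrix_alt service_metrics
instance (service_metrics : List (String × List (String × List String))) (out : List (List Int) × List String) : Decidable (Spec_build_coupling_matrix service_metrics out) := by unfold Spec_build_coupling_matrix; infer_instance

-- ===== CLAIM (what is proved, stated in full; the proofs are below) =====
def Claim_equal_build_coupling_matrix : Prop := ∀ (service_metrics : List (String × List (String × List String))), Dom_build_coupling_matrix service_metrics → Pre_build_coupling_matrix service_metrics → Spec_build_coupling_matrix service_metrics (build_coupling_matrix service_metrics)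

-- ===== LEMMAS AND PROOFS =====

-- the dependency list A reads (and B reads) for one metrics dict
def pvDeps (metrics : List (String × List String)) : List String :=
  (PySem.Dict.ofList metrics).getD "service_dependencies" []

-- the row B builds for one item, written with a plain membership test
def pvBRow (names : List String) (p : String × List (String × List String)) : List Int :=
  names.map (fun o => if o ∈ pvDeps p.2 then (1 : Int) else 0)

lemma pvNti_items (names : List String) (hnd : names.Nodup) :
    (pvBuildNameToIdx names).items = (PySem.List.enumerate names 0).map (fun a => (a.2, a.1)) := by
  unfold pvBuildNameToIdx
  rw [PySem.Dict.items_foldl_insert_fresh]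
  · rfl
  · intro a _; exact PySem.Dict.contains_empty _
  · rw [PySem.List.map_snd_enumerate]; exact hnd

lemma pvNti_keys (names : List String) (hnd : names.Nodup) :
    (pvBuildNameToIdx names).keys = names := by
  simp only [PySem.Dict.keys, pvNti_items names hnd, List.map_map]
  have h : (Prod.fst ∘ fun (a : Int × String) => (a.2, a.1)) = (fun a => a.2) := rfl
  rw [h, PySem.List.map_snd_enumerate]

lemma pvNti_contains (names : List String) (hnd : names.Nodup) (x : String) :
    (pvBuildNameToIdx names).contains x = decide (x ∈ names) := by
  rw [PySem.Dict.contains_eq_decide_mem_keys, pvNti_keys names hnd]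

lemma pvNti_getD (names : List String) (hnd : names.Nodup) (j : Nat) (hj : j < names.length) :
    (pvBuildNameToIdx names).getD names[j] 0 = (j : Int) := by
  apply PySem.Dict.getD_of_mem_items
  · rw [pvNti_items names hnd]
    refine List.mem_map.mpr ⟨(PySem.List.enumerate names 0)[j]'(by simp [PySem.List.length_enumerate, hj]), List.getElem_mem _, ?_⟩
    rw [PySem.List.getElem_enumerate]
    simp
  · rw [pvNti_keys names hnd]; exact hnd

lemma pvNti_getD_mem (names : List String) (hnd : names.Nodup) (x : String) (hx : x ∈ names) :
    (pvBuildNameToIdx names).getD x 0 = (names.idxOf x : Int) := by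
  have h := pvNti_getD names hnd (names.idxOf x) (List.idxOf_lt_length_of_mem hx)
  rwa [List.getElem_idxOf] at h

lemma pvModifyId {α : Type} (m : List α) (i : Nat) : m.modify i (fun r => r) = m := by
  rw [List.modify_eq_set_getElem?]
  cases h : m[i]? with
  | none => rfl
  | some v =>
    obtain ⟨hi, hv⟩ := List.getElem?_eq_some_iff.mp h
    show m.set i v = m
    rw [← hv]; exact List.set_getElem_self hi

lemma pvModifyModify {α : Type} (m : List α) (i : Nat) (f g : α → α) :
    (m.modify i f).modify i g = m.modify i (fun x => g (f x)) := by
  apply List.ext_getElem?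
  intro j
  rw [List.getElem?_modify, List.getElem?_modify, List.getElem?_modify]
  cases h : m[j]? <;> by_cases hij : i = j <;> simp [hij]

lemma pvModifyAppend {α : Type} (xs ys : List α) (f : α → α) :
    (xs ++ ys).modify xs.length f = xs ++ ys.modify 0 f := by
  induction xs with
  | nil => simp
  | cons a t ih => simp only [List.cons_append, List.length_cons, List.modify_succ_cons, ih]

lemma pvModifyAppend' {α : Type} (xs ys : List α) (i : Nat) (h : i = xs.length) (f : α → α) :
    (xs ++ ys).modify i f = xs ++ ys.modify 0 f := by
  rw [h]; exact pvModifyAppend xs ys f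

-- the inner loop over deps modifies a single fixed row
lemma pvInnerMat (c : String → Bool) (g : String → Nat) (i : Nat) (deps : List String) :
    ∀ (m : List (List Int)),
      deps.foldl (fun m dep => if c dep then m.modify i (fun r => r.set (g dep) 1) else m) m
        = m.modify i (fun r => deps.foldl (fun r dep => if c dep then r.set (g dep) 1 else r) r) := by
  induction deps with
  | nil => intro m; exact (pvModifyId m i).symm
  | cons dep rest ih =>
    intro m
    by_cases h : c dep = true
    · simp only [List.foldl_cons, h, if_true]
      rw [ih, pvModifyModify]
    · simp only [List.foldl_cons, h]
      exact ih m

lemma pvRowFold_length (names deps : List String) :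
    ∀ (r : List Int),
      (deps.foldl (fun r dep => if decide (dep ∈ names) = true then r.set (names.idxOf dep) 1 else r) r).length = r.length := by
  induction deps with
  | nil => intro r; rfl
  | cons dep rest ih =>
    intro r
    simp only [List.foldl_cons]
    by_cases h : dep ∈ names
    · rw [if_pos (by simp [h]), ih]; simp
    · rw [if_neg (by simp [h])]; exact ih r

lemma pvRowFold (names : List String) (hnd : names.Nodup) (deps : List String) :
    ∀ (r : List Int), r.length = names.length → ∀ (j : Nat) (hj : j < names.length),
      (deps.foldl (fun r dep => if decide (dep ∈ names) = true then r.set (names.idxOf dep) 1 else r) r)[j]?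
        = if names[j] ∈ deps then some 1 else r[j]? := by
  induction deps with
  | nil => intro r _ j hj; simp
  | cons dep rest ih =>
    intro r hr j hj
    simp only [List.foldl_cons]
    by_cases hd : dep ∈ names
    · have hlt := List.idxOf_lt_length_of_mem hd
      have hlen : (r.set (names.idxOf dep) 1).length = names.length := by simp [hr]
      rw [if_pos (by simp [hd]), ih _ hlen j hj]
      by_cases h1 : names[j] ∈ rest
      · simp [h1, List.mem_cons]
      · by_cases h2 : names[j] = dep
        · have hidx : names.idxOf dep = j := by rw [← h2]; exact hnd.idxOf_getElem j hj
          rw [if_neg h1, if_pos (by simp [h2]), hidx,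
            List.getElem?_set_self (by omega : j < r.length)]
        · have hmem : names[j] ∉ (dep :: rest) := by simp [h2, h1]
          have hne : j ≠ names.idxOf dep := by
            intro he
            exact h2 (by subst he; exact List.getElem_idxOf hlt)
          rw [if_neg h1, if_neg hmem, List.getElem?_set_ne (by omega)]
    · have hnem : names[j] ≠ dep := fun he => hd (he ▸ List.getElem_mem hj)
      rw [if_neg (by simp [hd]), ih _ hr j hj]
      simp [List.mem_cons, hnem]

lemma pvPyRangeConst (n : Nat) (x : List Int) :
    (PySem.List.pyRange 0 (n : Int) 1).map (fun _ => x) = List.replicate n x := by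
  rw [PySem.List.pyRange_zero_natCast, List.map_map]
  rw [show ((fun (_ : Int) => x) ∘ fun (k : Nat) => (k : Int)) = (fun _ => x) from rfl]
  rw [List.map_const']; simp

lemma pvZeroRowConst (n : Nat) :
    (PySem.List.pyRange 0 (n : Int) 1).map (fun _ => (0 : Int)) = List.replicate n 0 := by
  rw [PySem.List.pyRange_zero_natCast, List.map_map]
  rw [show ((fun (_ : Int) => (0:Int)) ∘ fun (k : Nat) => (k : Int)) = (fun _ => (0:Int)) from rfl]
  rw [List.map_const']; simp

-- the whole dense row B would build for item t, reached by A's scatter over a zero row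
lemma pvRowEq (names : List String) (hnd : names.Nodup) (deps : List String) :
    deps.foldl (fun r dep => if decide (dep ∈ names) = true then r.set (names.idxOf dep) 1 else r)
      (List.replicate names.length (0 : Int))
      = names.map (fun o => if o ∈ deps then (1 : Int) else 0) := by
  apply List.ext_getElem?
  intro j
  by_cases hj : j < names.length
  · rw [pvRowFold names hnd deps _ (by simp) j hj]
    by_cases hm : names[j] ∈ deps
    · simp [hm, List.getElem?_map, List.getElem?_eq_getElem hj]
    · simp [hm, hj]
  · rw [List.getElem?_eq_none (by rw [pvRowFold_length]; simpa using Nat.le_of_not_lt hj),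
      List.getElem?_eq_none (by simpa using Nat.le_of_not_lt hj)]

-- invariant of A's outer loop: after t items, the first t rows are B's rows, the rest are still zero
lemma pvOuter (items : List (String × List (String × List String))) (names : List String)
    (hkeys : names = items.map (·.1)) (hnd : names.Nodup) :
    ∀ t, t ≤ items.length →
      ((items.take t).foldl (fun mat p =>
        if (pvBuildNameToIdx names).contains p.1 then
          (pvDeps p.2).foldl (fun mat dep =>
            if (pvBuildNameToIdx names).contains dep then
              pvSetEntry mat ((pvBuildNameToIdx names).getD p.1 0) ((pvBuildNameToIdx names).getD dep 0)
            else mat) mat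
        else mat) (List.replicate names.length (List.replicate names.length (0 : Int))))
      = (items.take t).map (pvBRow names) ++ List.replicate (names.length - t) (List.replicate names.length 0) := by
  have hlen : items.length = names.length := by rw [hkeys, List.length_map]
  intro t ht
  induction t with
  | zero => simp
  | succ t ih =>
    have htl : t < items.length := Nat.lt_of_lt_of_le (Nat.lt_succ_self t) ht
    have prev := ih (Nat.le_of_lt htl)
    rw [List.take_add_one, List.getElem?_eq_getElem htl]
    simp only [Option.toList_some, List.foldl_append, List.map_append, List.foldl_cons,
      List.foldl_nil, List.map_cons, List.map_nil, prev]
    -- the processed item's name is names[t]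
    have hjt : t < names.length := by omega
    have hp1 : (items[t]'htl).1 = names[t]'hjt := by
      rw [List.getElem_of_eq hkeys hjt, List.getElem_map]
    have hmem : (items[t]'htl).1 ∈ names := by rw [hp1]; exact List.getElem_mem hjt
    rw [if_pos (by rw [pvNti_contains names hnd]; simp [hmem])]
    have hsi : (pvBuildNameToIdx names).getD (items[t]'htl).1 0 = (t : Int) := by
      rw [hp1]; exact pvNti_getD names hnd t hjt
    -- the inner loop modifies only row t, by first-occurrence index
    simp only [pvSetEntry, hsi, Int.toNat_natCast]
    rw [pvInnerMat]
    have hfun : (fun (r : List Int) => (pvDeps (items[t]'htl).2).foldl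
          (fun r dep => if (pvBuildNameToIdx names).contains dep then
            r.set ((pvBuildNameToIdx names).getD dep 0).toNat 1 else r) r)
        = (fun (r : List Int) => (pvDeps (items[t]'htl).2).foldl
          (fun r dep => if decide (dep ∈ names) = true then r.set (names.idxOf dep) 1 else r) r) := by
      funext r
      congr 1
      funext r dep
      by_cases hd : dep ∈ names
      · rw [pvNti_contains names hnd, pvNti_getD_mem names hnd dep hd]
        simp [hd]
      · rw [pvNti_contains names hnd]
        simp [hd]
    rw [hfun]
    -- split the matrix at the modified row
    have hpl : ((items.take t).map (pvBRow names)).length = t := by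
      rw [List.length_map, List.length_take]; omega
    have hrep : names.length - t = (names.length - (t + 1)) + 1 := by omega
    rw [hrep, List.replicate_succ, pvModifyAppend' _ _ t hpl.symm, List.modify_zero_cons]
    rw [pvRowEq names hnd]
    simp [pvBRow, List.append_assoc]
theorem build_coupling_matrix_spec : Claim_equal_build_coupling_matrix := by
  intro sm _ hpre
  unfold Spec_build_coupling_matrix build_coupling_matrix build_coupling_matrix_alt
  simp only []
  have hnd : (PySem.Dict.ofList sm).keys.Nodup := PySem.Dict.nodup_keys_ofList sm
  have hkeys : (PySem.Dict.ofList sm).keys = (PySem.Dict.ofList sm).items.map (·.1) := rfl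
  have hvals : (PySem.Dict.ofList sm).values = (PySem.Dict.ofList sm).items.map (·.2) := rfl
  refine Prod.ext ?_ rfl
  -- A's matrix: run the outer-loop invariant to the end
  have hA := pvOuter (PySem.Dict.ofList sm).items (PySem.Dict.ofList sm).keys hkeys hnd
      (PySem.Dict.ofList sm).items.length (le_refl _)
  rw [List.take_length] at hA
  have hlen : (PySem.Dict.ofList sm).items.length = (PySem.Dict.ofList sm).keys.length := by
    rw [hkeys, List.length_map]
  rw [hlen, Nat.sub_self, List.replicate_zero, List.append_nil] at hA
  show ((PySem.Dict.ofList sm).items.foldl _ _) = _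
  rw [pvZeroRowConst, pvPyRangeConst]
  simp only [pvDeps] at hA
  rw [hA]
  -- B's matrix is the same list of rows
  rw [hvals, List.map_map]
  apply List.map_congr_left
  intro p _
  simp only [Function.comp, pvBRow, pvDeps]
  apply List.map_congr_left
  intro o _
  congr 1
  simp [PySem.Set.contains, PySem.Set.mem_ofList]
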